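-- pv_equiv track=rewrite | github.com/EnkrateiaLucca/oreilly-python-course | scripts/additional-scripts/LA_file_organizer.py | _get_text_comparison_stats
-- ===== SOURCE A (Python) =====
-- from typing import Dict, List, Tuple, Optional, Any
--
-- def _get_text_comparison_stats(file_contents: List[List[str]]) -> Dict[str, Any]:
--     """Get statistical comparison of text files"""
--     stats = {
--         'line_counts': [len(content) for content in file_contents],
--         'word_counts': [],
--         'character_counts': []
--     }
--
--     for content_lines in file_contents:
--         content_text = '\n'.join(content_lines)
--         stats['word_counts'].append(len(content_text.split()))
--         stats['character_counts'].append(len(content_text))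
--
--     return stats
-- ===== SOURCE B (Python) =====
-- from typing import Dict, List, Any
--
-- def _get_text_comparison_stats(file_contents: List[List[str]]) -> Dict[str, Any]:
--     """Get statistical comparison of text files (single pass, per-line accumulation)."""
--     line_counts = []
--     word_counts = []
--     character_counts = []
--     for lines in file_contents:
--         line_counts.append(len(lines))
--         word_counts.append(sum(len(line.split()) for line in lines))
--         character_counts.append(sum(len(line) for line in lines) + max(len(lines) - 1, 0))
--     return {
--         'line_counts': line_counts,
--         'word_counts': word_counts,
--         'character_counts': character_counts,
--     }
-- ===== Notes on version B (the rewrite author's own statement) =====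
-- stated objective: alternative
-- what changed: B makes a single pass that accumulates all three lists at once, computing word/character counts per line by summation instead of joining each file's lines into one big string and scanning it.
import Mathlib
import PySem

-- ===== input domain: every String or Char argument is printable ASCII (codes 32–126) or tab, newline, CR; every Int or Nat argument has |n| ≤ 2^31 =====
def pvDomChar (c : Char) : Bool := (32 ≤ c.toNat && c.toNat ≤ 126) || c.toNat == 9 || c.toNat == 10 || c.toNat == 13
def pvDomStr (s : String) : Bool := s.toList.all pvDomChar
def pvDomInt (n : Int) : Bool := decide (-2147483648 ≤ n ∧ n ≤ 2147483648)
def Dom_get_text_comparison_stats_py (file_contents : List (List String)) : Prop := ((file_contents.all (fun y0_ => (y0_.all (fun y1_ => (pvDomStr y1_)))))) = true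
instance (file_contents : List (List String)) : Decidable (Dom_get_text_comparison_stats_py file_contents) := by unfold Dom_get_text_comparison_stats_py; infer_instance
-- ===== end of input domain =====

-- B replaces A's join-each-file-into-one-string-then-scan by a single pass that
-- accumulates all three lists at once, summing word/character counts per line.

-- ===== PORT A =====
-- A: dict literal with 'line_counts' precomputed, then a loop joining each file's
-- lines into one string and appending its split()-length and its length.
def get_text_comparison_stats_py (file_contents : List (List String)) : List (String × List Int) :=
  let stats : PySem.Dict String (List Int) :=
    (((PySem.Dict.mk []).insert "line_counts"
        (file_contents.map (fun content => (content.length : Int)))).insert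
      "word_counts" []).insert "character_counts" []
  let stats := file_contents.foldl (fun d content_lines =>
      let content_text := PySem.Str.join "\n" content_lines
      let d := d.modify "word_counts" [] (· ++ [((PySem.Str.split₀ content_text).length : Int)])
      d.modify "character_counts" [] (· ++ [PySem.Str.len content_text])) stats
  stats.items

-- ===== PORT B =====
-- B-side helpers: Source B's per-file generator-expression sums
def pvB_words (lines : List String) : Int :=
  lines.foldl (fun a line => a + ((PySem.Str.split₀ line).length : Int)) 0

def pvB_chars (lines : List String) : Int :=
  lines.foldl (fun a line => a + PySem.Str.len line) 0 + max ((lines.length : Int) - 1) 0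

def get_text_comparison_stats_py_alt (file_contents : List (List String)) : List (String × List Int) :=
  let acc := file_contents.foldl
    (fun (acc : List Int × List Int × List Int) lines =>
      (acc.1 ++ [(lines.length : Int)],
       acc.2.1 ++ [pvB_words lines],
       acc.2.2 ++ [pvB_chars lines]))
    ([], [], [])
  [("line_counts", acc.1), ("word_counts", acc.2.1), ("character_counts", acc.2.2)]

-- ===== PRECONDITION & SPEC =====
def Spec_get_text_comparison_stats_py (file_contents : List (List String)) (out : List (String × List Int)) : Prop := out = get_text_comparison_stats_py_alt file_contents
instance (file_contents : List (List String)) (out : List (String × List Int)) : Decidable (Spec_get_text_comparison_stats_py file_contents out) := by unfold Spec_get_text_comparison_stats_py; infer_instance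

-- ===== CLAIM (what is proved, stated in full; the proofs are below) =====
def Claim_equal_get_text_comparison_stats_py : Prop := ∀ (file_contents : List (List String)), Dom_get_text_comparison_stats_py file_contents → Spec_get_text_comparison_stats_py file_contents (get_text_comparison_stats_py file_contents)

-- ===== LEMMAS AND PROOFS =====

theorem pv_go_acc (s : List Char) : ∀ (cur : List Char) (acc : List (List Char)),
    PySem.Chars.split₀.go s cur acc = acc.reverse ++ PySem.Chars.split₀.go s cur [] := by
  induction s with
  | nil => intro cur acc; simp only [PySem.Chars.split₀.go]; split_ifs <;> simp
  | cons c rest ih =>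
    intro cur acc
    simp only [PySem.Chars.split₀.go]
    split_ifs with h1 h2
    · exact ih [] acc
    · rw [ih [] (cur.reverse :: acc), ih [] [cur.reverse]]; simp
    · exact ih (c :: cur) acc

theorem pv_split_ws (a : List Char) : ∀ (b cur : List Char) (acc : List (List Char)),
    PySem.Chars.split₀.go (a ++ '\n' :: b) cur acc
      = PySem.Chars.split₀.go a cur acc ++ PySem.Chars.split₀.go b [] [] := by
  induction a with
  | nil =>
    intro b cur acc
    simp only [List.nil_append, PySem.Chars.split₀.go]
    have hw : PySem.Chars.isspace '\n' = true := by decide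
    rw [hw]
    simp only [if_true]
    split_ifs with h
    · rw [pv_go_acc]
    · rw [pv_go_acc b [] (cur.reverse :: acc)]
  | cons c a' ih =>
    intro b cur acc
    simp only [List.cons_append, PySem.Chars.split₀.go]
    split_ifs with h1 h2
    · exact ih b [] acc
    · exact ih b [] (cur.reverse :: acc)
    · exact ih b (c :: cur) acc

theorem pv_split_nl (a b : List Char) :
    PySem.Chars.split₀ (a ++ '\n' :: b) = PySem.Chars.split₀ a ++ PySem.Chars.split₀ b := by
  simpa [PySem.Chars.split₀] using pv_split_ws a b [] []

theorem pv_split₀_join_nl (lines : List (List Char)) :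
    (PySem.Chars.split₀ (PySem.Chars.join ['\n'] lines)).length
      = (lines.map (fun l => (PySem.Chars.split₀ l).length)).sum := by
  induction lines with
  | nil => simp [PySem.Chars.join, PySem.Chars.split₀, PySem.Chars.split₀.go, List.intercalate]
  | cons l ls ih =>
    cases ls with
    | nil => simp [PySem.Chars.join, List.intercalate]
    | cons l2 ls2 =>
      have h : PySem.Chars.join ['\n'] (l :: l2 :: ls2)
          = l ++ '\n' :: PySem.Chars.join ['\n'] (l2 :: ls2) := by
        simp [PySem.Chars.join, List.intercalate, List.intersperse]
      rw [h, pv_split_nl]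
      simp only [List.map_cons, List.sum_cons, List.length_append]
      rw [ih]
      simp

theorem pv_join_nl_length (lines : List (List Char)) :
    ((PySem.Chars.join ['\n'] lines).length : Int)
      = (lines.map (fun l => (l.length : Int))).sum + max ((lines.length : Int) - 1) 0 := by
  induction lines with
  | nil => simp [PySem.Chars.join, List.intercalate]
  | cons l ls ih =>
    cases ls with
    | nil => simp [PySem.Chars.join, List.intercalate]
    | cons l2 ls2 =>
      have h : PySem.Chars.join ['\n'] (l :: l2 :: ls2)
          = l ++ '\n' :: PySem.Chars.join ['\n'] (l2 :: ls2) := by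
        simp [PySem.Chars.join, List.intercalate, List.intersperse]
      rw [h]
      simp only [List.length_append, List.length_cons, List.map_cons, List.sum_cons] at *
      push_cast at *
      omega

theorem pv_foldl_add_int (f : String → Int) (lines : List String) : ∀ (a : Int),
    lines.foldl (fun a l => a + f l) a = a + (lines.map f).sum := by
  induction lines with
  | nil => intro a; simp
  | cons l ls ih => intro a; simp [ih]; ring

theorem pv_words_eq (lines : List String) :
    ((PySem.Str.split₀ (PySem.Str.join "\n" lines)).length : Int) = pvB_words lines := by
  have h1 : (PySem.Str.split₀ (PySem.Str.join "\n" lines)).length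
      = (PySem.Chars.split₀ (PySem.Str.join "\n" lines).toList).length := by
    rw [← PySem.Str.split₀_map_toList, List.length_map]
  have hnl : "\n".toList = ['\n'] := by decide
  rw [pvB_words, pv_foldl_add_int (fun l => ((PySem.Str.split₀ l).length : Int)), h1,
    PySem.Str.toList_join, hnl, pv_split₀_join_nl]
  have h2 : ∀ s : String, (PySem.Chars.split₀ s.toList).length = (PySem.Str.split₀ s).length := by
    intro s; rw [← PySem.Str.split₀_map_toList, List.length_map]
  simp only [List.map_map, Function.comp_def, h2]
  push_cast
  simp [Function.comp_def]

theorem pv_chars_eq (lines : List String) :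
    PySem.Str.len (PySem.Str.join "\n" lines) = pvB_chars lines := by
  have hnl : "\n".toList = ['\n'] := by decide
  rw [PySem.Str.len_eq, PySem.Str.toList_join, hnl]
  have := pv_join_nl_length (lines.map String.toList)
  simp only [List.length_map] at this
  rw [pvB_chars, pv_foldl_add_int PySem.Str.len]
  rw [this, List.map_map]
  have : ((fun (l : List Char) => (l.length : Int)) ∘ String.toList) = PySem.Str.len := by
    funext s; simp [PySem.Str.len_eq]
  rw [this]
  ring

theorem pv_A_loop (fc : List (List String)) : ∀ (L W C : List Int),
    (fc.foldl (fun d content_lines =>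
        let content_text := PySem.Str.join "\n" content_lines
        let d := d.modify "word_counts" [] (· ++ [((PySem.Str.split₀ content_text).length : Int)])
        d.modify "character_counts" [] (· ++ [PySem.Str.len content_text]))
      (PySem.Dict.mk [("line_counts", L), ("word_counts", W), ("character_counts", C)])).items
    = [("line_counts", L),
       ("word_counts", W ++ fc.map (fun ls => ((PySem.Str.split₀ (PySem.Str.join "\n" ls)).length : Int))),
       ("character_counts", C ++ fc.map (fun ls => PySem.Str.len (PySem.Str.join "\n" ls)))] := by
  induction fc with
  | nil => intro L W C; simp
  | cons ls fcs ih =>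
    intro L W C
    simp only [List.foldl_cons]
    have hstep : ((PySem.Dict.mk [("line_counts", L), ("word_counts", W), ("character_counts", C)]).modify
          "word_counts" [] (· ++ [((PySem.Str.split₀ (PySem.Str.join "\n" ls)).length : Int)])).modify
          "character_counts" [] (· ++ [PySem.Str.len (PySem.Str.join "\n" ls)])
        = PySem.Dict.mk [("line_counts", L),
            ("word_counts", W ++ [((PySem.Str.split₀ (PySem.Str.join "\n" ls)).length : Int)]),
            ("character_counts", C ++ [PySem.Str.len (PySem.Str.join "\n" ls)])] := by
      simp [PySem.Dict.modify, PySem.Dict.insert, PySem.Dict.getD, PySem.Dict.get?,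
        PySem.Dict.contains]
    rw [hstep, ih]
    simp

theorem pv_B_loop (fc : List (List String)) : ∀ (l w c : List Int),
    fc.foldl
      (fun (acc : List Int × List Int × List Int) lines =>
        (acc.1 ++ [(lines.length : Int)],
         acc.2.1 ++ [pvB_words lines],
         acc.2.2 ++ [pvB_chars lines]))
      (l, w, c)
    = (l ++ fc.map (fun ls => (ls.length : Int)),
       w ++ fc.map pvB_words,
       c ++ fc.map pvB_chars) := by
  induction fc with
  | nil => intro l w c; simp
  | cons ls fcs ih => intro l w c; simp [ih]

-- ===== VERDICT (by name: the statement is the Claim_ definition above) =====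
theorem get_text_comparison_stats_py_spec : Claim_equal_get_text_comparison_stats_py := by
  intro fc _
  unfold Spec_get_text_comparison_stats_py get_text_comparison_stats_py get_text_comparison_stats_py_alt
  have hinit : (((PySem.Dict.mk ([] : List (String × List Int))).insert "line_counts"
        (fc.map (fun content => (content.length : Int)))).insert
      "word_counts" []).insert "character_counts" []
      = PySem.Dict.mk [("line_counts", fc.map (fun content => (content.length : Int))),
          ("word_counts", []), ("character_counts", [])] := by
    simp [PySem.Dict.insert, PySem.Dict.contains]
  rw [hinit, pv_A_loop, pv_B_loop]
  simp [pv_words_eq]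
  intro a _
  rw [← pv_chars_eq a]
  simp [PySem.Str.len_eq, PySem.Str.toList_join]
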